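-- pv_equiv track=rewrite | github.com/diexmontana/LabADAGrupoC | Aula 08/ParentesisValido.py | parentesisValido
-- ===== SOURCE A (Python) =====
-- def parentesisValido (cadena) :
--     # Comprueba los pares de parentesis validos que abren y cierran
--     # Devuelve el numero de parentesis sobrantes
--     stack =[]
--
--     for val in cadena:
--         if val == ")":
--             if len(stack) != 0 and stack[-1] == "(":
--                 stack.pop(-1)
--             else:
--                 stack.append(val)
--         else:
--             stack.append(val)
--
--     return len(stack)
-- ===== SOURCE B (Python) =====
-- def parentesisValido(cadena):
--     # Repeated-scan bracket reduction: delete adjacent "()" pairs until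
--     # a full pass removes nothing; the leftover length is the answer.
--     elems = list(cadena)
--     while True:
--         out = []
--         i = 0
--         removed = False
--         while i < len(elems):
--             if i + 1 < len(elems) and elems[i] == "(" and elems[i + 1] == ")":
--                 i += 2
--                 removed = True
--             else:
--                 out.append(elems[i])
--                 i += 1
--         if not removed:
--             return len(out)
--         elems = out
-- ===== Notes on version B (the rewrite author's own statement) =====
-- stated objective: alternative
-- what changed: Replaces the single-pass stack with a fixpoint reduction that repeatedly scans the characters and deletes adjacent '(' ')' pairs until a pass removes nothing, returning the leftover length.
import Mathlib
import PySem

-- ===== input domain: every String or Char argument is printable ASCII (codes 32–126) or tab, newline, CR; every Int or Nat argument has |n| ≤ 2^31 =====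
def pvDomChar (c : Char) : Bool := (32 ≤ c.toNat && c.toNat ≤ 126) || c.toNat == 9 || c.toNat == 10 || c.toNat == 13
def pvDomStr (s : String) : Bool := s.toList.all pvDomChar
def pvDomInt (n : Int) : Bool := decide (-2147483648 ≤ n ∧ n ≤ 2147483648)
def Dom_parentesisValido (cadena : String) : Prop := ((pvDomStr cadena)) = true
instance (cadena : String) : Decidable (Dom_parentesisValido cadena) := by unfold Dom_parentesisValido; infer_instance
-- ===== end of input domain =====

-- B replaces A's single-pass stack with a repeated-scan reduction deleting adjacent "()" pairs
-- until a fixpoint; same return value, a different algorithm (not faster).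

-- ===== PORT A =====
-- the loop body: push every char; on ')' with top '(' pop instead (stack kept head-first)
def pvStepA (stack : List Char) (val : Char) : List Char :=
  if val = ')' then
    match stack with
    | '(' :: rest => rest
    | _ => val :: stack
  else val :: stack

def parentesisValido (cadena : String) : Int :=
  ((cadena.toList.foldl pvStepA []).length : Int)

-- ===== PORT B =====
-- one left-to-right scan dropping each adjacent '(' ')' pair (the inner while-loop of Source B)
def pvOnePass : List Char → List Char
  | '(' :: ')' :: r => pvOnePass r
  | c :: r => c :: pvOnePass r
  | [] => []

theorem pvOnePass_length_le (l : List Char) : (pvOnePass l).length ≤ l.length := by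
  induction l using pvOnePass.induct with
  | case1 r ih => simp [pvOnePass]; omega
  | case2 c r h _ => simp [pvOnePass.eq_2 c r h]; omega
  | case3 => simp [pvOnePass]

theorem pvOnePass_ne_lt (l : List Char) (h : pvOnePass l ≠ l) : (pvOnePass l).length < l.length := by
  induction l using pvOnePass.induct with
  | case1 r ih =>
      have := pvOnePass_length_le r
      simp [pvOnePass]; omega
  | case2 c r hne ih =>
      rw [pvOnePass.eq_2 c r hne] at h ⊢
      have hr : pvOnePass r ≠ r := fun he => h (by rw [he])
      simpa using ih hr
  | case3 => simp [pvOnePass] at h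

-- the outer while-loop of Source B: rescan until a pass removes nothing
def pvReduce (l : List Char) : List Char :=
  if h : pvOnePass l = l then l else pvReduce (pvOnePass l)
termination_by l.length
decreasing_by exact pvOnePass_ne_lt l h

def parentesisValido_alt (cadena : String) : Int :=
  ((pvReduce cadena.toList).length : Int)

-- ===== PRECONDITION & SPEC =====
def Spec_parentesisValido (cadena : String) (out : Int) : Prop := out = parentesisValido_alt cadena
instance (cadena : String) (out : Int) : Decidable (Spec_parentesisValido cadena out) := by unfold Spec_parentesisValido; infer_instance

-- ===== CLAIM (what is proved, stated in full; the proofs are below) =====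
def Claim_equal_parentesisValido : Prop := ∀ (cadena : String), Dom_parentesisValido cadena → Spec_parentesisValido cadena (parentesisValido cadena)

-- ===== LEMMAS AND PROOFS =====

-- A's stack fold is invariant under one reduction pass
theorem foldA_onePass (l : List Char) : ∀ st : List Char,
    List.foldl pvStepA st (pvOnePass l) = List.foldl pvStepA st l := by
  induction l using pvOnePass.induct with
  | case1 r ih =>
      intro st
      simp [pvOnePass, List.foldl, pvStepA, ih]
  | case2 c r hne ih =>
      intro st
      rw [pvOnePass.eq_2 c r hne]
      simp [List.foldl, ih]
  | case3 => intro st; simp [pvOnePass]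

-- on a fixpoint of pvOnePass the stack never pops, so the fold only lengthens the stack
theorem foldA_fix_length (l : List Char) : ∀ st : List Char,
    pvOnePass l = l → (st.head? = some '(' → l.head? ≠ some ')') →
    (List.foldl pvStepA st l).length = st.length + l.length := by
  induction l with
  | nil => intro st _ _; simp
  | cons c r ih =>
      intro st hfix hhead
      by_cases hpair : c = '(' ∧ r.head? = some ')'
      · -- impossible on a fixpoint: the pass would delete the pair
        obtain ⟨hc, hr⟩ := hpair
        obtain ⟨r', hr'⟩ : ∃ r', r = ')' :: r' := by
          cases r with
          | nil => simp at hr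
          | cons x xs => simp at hr; exact ⟨xs, by rw [hr]⟩
        subst hc; subst hr'
        have hlt : (pvOnePass ('(' :: ')' :: r')).length < ('(' :: ')' :: r').length := by
          have := pvOnePass_length_le r'
          simp [pvOnePass]; omega
        rw [hfix] at hlt; omega
      · -- no pop at this step
        have hstep : pvStepA st c = c :: st := by
          unfold pvStepA
          split
          · rename_i hc
            cases st with
            | nil => rfl
            | cons t ts =>
                cases hts : decide (t = '(') with
                | true =>
                    have ht : t = '(' := by simpa using hts
                    exact absurd (by simp [hc] : (c :: r).head? = some ')')
                      (fun hx => by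
                        have := hhead (by simp [ht])
                        simp [hc] at this)
                | false =>
                    have ht : t ≠ '(' := by simpa using hts
                    cases t; simp_all
          · rfl
        -- the tail is also a fixpoint
        have hfix' : pvOnePass r = r := by
          have h2 : pvOnePass (c :: r) = c :: pvOnePass r := by
            apply pvOnePass.eq_2
            intro x hc hr
            exact hpair ⟨hc, by rw [hr]; rfl⟩
          rw [h2] at hfix
          injection hfix
        have hhead' : (c :: st).head? = some '(' → r.head? ≠ some ')' := by
          intro hc hr
          exact hpair ⟨by simpa using hc, hr⟩
        rw [List.foldl, hstep, ih (c :: st) hfix' hhead']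
        simp; omega

theorem pvReduce_foldA (l : List Char) :
    List.foldl pvStepA [] (pvReduce l) = List.foldl pvStepA [] l := by
  induction l using pvReduce.induct with
  | case1 l h => rw [pvReduce, dif_pos h]
  | case2 l h ih =>
      rw [pvReduce, dif_neg h]
      rw [ih, foldA_onePass]

theorem pvReduce_fix (l : List Char) : pvOnePass (pvReduce l) = pvReduce l := by
  induction l using pvReduce.induct with
  | case1 l h => rw [pvReduce, dif_pos h]; exact h
  | case2 l h ih => rw [pvReduce, dif_neg h]; exact ih

-- ===== VERDICT (by name: the statement is the Claim_ definition above) =====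
theorem parentesisValido_spec : Claim_equal_parentesisValido := by
  intro cadena _
  unfold Spec_parentesisValido parentesisValido parentesisValido_alt
  have h1 := pvReduce_foldA cadena.toList
  have h2 := foldA_fix_length (pvReduce cadena.toList) [] (pvReduce_fix cadena.toList)
    (by intro h; simp at h)
  rw [← h1, h2]
  simp
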